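-- pv_equiv track=rewrite | github.com/kevinjzh/nTracer2-copy | vis.py | assign_unique_colors
-- ===== SOURCE A (Python) =====
-- def assign_unique_colors(num_channels):
--     distinct_colors = [
--         "red", "green", "blue", "yellow", "magenta", "cyan", "orange", "purple",
--         "lime", "pink", "teal", "brown", "navy", "maroon", "olive", "silver",
--         "gold", "indigo", "coral", "salmon"
--     ]
--     colors = []
--     for i in range(num_channels):
--         colors.append(distinct_colors[i % len(distinct_colors)])
--     return colors
-- ===== SOURCE B (Python) =====
-- def assign_unique_colors(num_channels):
--     distinct_colors = [
--         "red", "green", "blue", "yellow", "magenta", "cyan", "orange", "purple",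
--         "lime", "pink", "teal", "brown", "navy", "maroon", "olive", "silver",
--         "gold", "indigo", "coral", "salmon"
--     ]
--     colors = []
--     n = num_channels
--     while n >= 20:
--         colors += distinct_colors
--         n -= 20
--     if n > 0:
--         colors += distinct_colors[:n]
--     return colors
-- ===== Notes on version B (the rewrite author's own statement) =====
-- stated objective: alternative
-- what changed: Replaces A's per-element loop (n iterations, each computing i % 20 and appending one color) by whole-palette chunking: a while loop that appends the entire 20-element palette per iteration (n//20 iterations, no per-element index arithmetic) followed by one slice for the remainder.
import Mathlib
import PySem

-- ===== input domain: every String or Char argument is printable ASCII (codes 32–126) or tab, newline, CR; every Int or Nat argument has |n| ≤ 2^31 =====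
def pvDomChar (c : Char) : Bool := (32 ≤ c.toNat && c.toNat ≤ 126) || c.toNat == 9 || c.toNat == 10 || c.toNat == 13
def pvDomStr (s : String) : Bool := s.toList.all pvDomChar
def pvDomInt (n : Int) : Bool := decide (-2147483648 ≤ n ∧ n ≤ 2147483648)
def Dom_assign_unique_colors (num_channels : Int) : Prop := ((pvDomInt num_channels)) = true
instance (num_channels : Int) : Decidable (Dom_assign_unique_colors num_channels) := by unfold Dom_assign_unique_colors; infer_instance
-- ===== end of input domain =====

-- B replaces A's per-element loop (append distinct_colors[i % 20] for each i) by
-- whole-palette chunking: a while loop appending the full palette per 20 channels, then one slice for the remainder.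


-- the module-level palette literal, shared verbatim by both Python versions
def pvPalette : List String :=
  ["red", "green", "blue", "yellow", "magenta", "cyan", "orange", "purple",
   "lime", "pink", "teal", "brown", "navy", "maroon", "olive", "silver",
   "gold", "indigo", "coral", "salmon"]

-- ===== PORT A =====
-- loop `for i in range(num_channels): colors.append(distinct_colors[i % len(distinct_colors)])`
-- (the index i % 20 is always in range, so xs[·] is ported with pyGetD)
def assign_unique_colors (num_channels : Int) : List String :=
  (PySem.List.pyRange 0 num_channels 1).foldl
    (fun colors i => colors ++ [PySem.List.pyGetD pvPalette (PySem.Int.mod i 20) ""]) []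

-- ===== PORT B =====
-- the while loop `while n >= 20: colors += distinct_colors; n -= 20`, then
-- `if n > 0: colors += distinct_colors[:n]`
def pvChunkLoop (colors : List String) (n : Int) : List String :=
  if 20 ≤ n then pvChunkLoop (colors ++ pvPalette) (n - 20)
  else if 0 < n then colors ++ PySem.List.slice pvPalette none (some n)
  else colors
termination_by n.toNat
decreasing_by omega

def assign_unique_colors_alt (num_channels : Int) : List String :=
  pvChunkLoop [] num_channels

-- ===== PRECONDITION & SPEC =====
def Spec_assign_unique_colors (num_channels : Int) (out : List String) : Prop := out = assign_unique_colors_alt num_channels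
instance (num_channels : Int) (out : List String) : Decidable (Spec_assign_unique_colors num_channels out) := by unfold Spec_assign_unique_colors; infer_instance

-- ===== CLAIM (what is proved, stated in full; the proofs are below) =====
def Claim_equal_assign_unique_colors : Prop := ∀ (num_channels : Int), Dom_assign_unique_colors num_channels → Spec_assign_unique_colors num_channels (assign_unique_colors num_channels)

-- ===== LEMMAS AND PROOFS =====

-- element k of the infinite color cycle
def pvCyc (k : Nat) : String := pvPalette.getD (k % 20) ""

-- A's loop produces the first n elements of the cycle
theorem pvA_eq (n : Int) :
    assign_unique_colors n = (List.range n.toNat).map pvCyc := by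
  unfold assign_unique_colors
  rw [PySem.List.foldl_append_singleton_eq_map, PySem.List.pyRange_one, List.map_map]
  simp only [Int.sub_zero]
  apply List.map_congr_left
  intro k _
  have hm : PySem.Int.mod (k : Int) 20 = ((k % 20 : Nat) : Int) := by
    exact_mod_cast PySem.Int.mod_natCast k 20
  simp only [Function.comp_apply, zero_add, hm, PySem.List.pyGetD_natCast]
  rfl

-- the palette is one full period of the cycle
theorem pvPalette_eq_cycle : (List.range 20).map pvCyc = pvPalette := by decide

theorem pvCycle_take (k : Nat) (hk : k ≤ 20) :
    pvPalette.take k = (List.range k).map pvCyc := by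
  rw [← pvPalette_eq_cycle, ← List.map_take, List.take_range, Nat.min_eq_left hk]

theorem pvCycle_shift (m : Nat) :
    (List.range (20 + m)).map pvCyc = pvPalette ++ (List.range m).map pvCyc := by
  rw [List.range_add, List.map_append, pvPalette_eq_cycle, List.map_map]
  congr 1
  apply List.map_congr_left
  intro k _
  simp [pvCyc, Nat.add_comm 20 k]

-- B's while loop invariant
theorem pvChunkLoop_eq (colors : List String) (n : Int) :
    pvChunkLoop colors n = colors ++ (List.range n.toNat).map pvCyc := by
  induction colors, n using pvChunkLoop.induct with
  | case1 colors n h ih =>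
      rw [pvChunkLoop, if_pos h, ih, List.append_assoc]
      congr 1
      have : n.toNat = 20 + (n - 20).toNat := by omega
      rw [this, pvCycle_shift]
  | case2 colors n h h0 =>
      rw [pvChunkLoop, if_neg h, if_pos h0, PySem.List.slice_to _ (by omega),
          pvCycle_take _ (by omega)]
  | case3 colors n h h0 =>
      rw [pvChunkLoop, if_neg h, if_neg h0]
      have : n.toNat = 0 := by omega
      simp [this]

-- ===== VERDICT (by name: the statement is the Claim_ definition above) =====
theorem assign_unique_colors_spec : Claim_equal_assign_unique_colors := by
  intro n _
  show _ = _
  rw [pvA_eq, assign_unique_colors_alt, pvChunkLoop_eq, List.nil_append]
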